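-- pv_equiv track=rewrite | github.com/alexjst/algorithms | Python/companies/Faire/06_ads_assortment_problem_solution.py | get_blocked_customers_verbose
-- ===== SOURCE A (Python) =====
-- from typing import List, Tuple
--
-- def get_blocked_customers_verbose(sent_ads: List[Tuple[str, str, int]], new_ad: Tuple[str, str, int]) -> List[str]:
--     """
--     More verbose implementation with explicit checks.
--     Same functionality as get_blocked_customers but easier to understand.
--     """
--     new_ad_name, new_customer, new_day = new_ad
--     new_week = get_week_number(new_day)
--
--     # Track customer activity by week
--     customer_weekly_ads = {}  # {customer: {week: [ad_names]}}
--
--     for ad_name, customer, day in sent_ads: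
--         week = get_week_number(day)
--
--         if customer not in customer_weekly_ads:
--             customer_weekly_ads[customer] = {}
--
--         if week not in customer_weekly_ads[customer]:
--             customer_weekly_ads[customer][week] = []
--
--         customer_weekly_ads[customer][week].append(ad_name)
--
--     # Check if customer should be blocked
--     blocked = []
--
--     # Check if this customer has any history
--     if new_customer in customer_weekly_ads:
--         # Check if customer has ads in the new ad's week
--         if new_week in customer_weekly_ads[new_customer]:
--             ads_in_week = customer_weekly_ads[new_customer][new_week]
--
--             # Condition 1: Same ad already received
--             if new_ad_name in ads_in_week:
--                 blocked.append(new_customer)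
--             # Condition 2: Already 3 ads in the week
--             elif len(ads_in_week) >= 3:
--                 blocked.append(new_customer)
--
--     return blocked
--
-- def get_week_number(day: int) -> int:
--     """
--     Convert day number to week number.
--     Days 1-7 = week 1, days 8-14 = week 2, etc.
--
--     Formula: week = (day - 1) // 7 + 1
--
--     Examples:
--         >>> get_week_number(1)
--         1
--         >>> get_week_number(7)
--         1
--         >>> get_week_number(8)
--         2
--         >>> get_week_number(14)
--         2
--     """
--     return (day - 1) // 7 + 1
-- ===== SOURCE B (Python) =====
-- from typing import List, Tuple
--
-- def get_week_number(day: int) -> int: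
--     return (day - 1) // 7 + 1
--
-- def get_blocked_customers_verbose(sent_ads: List[Tuple[str, str, int]], new_ad: Tuple[str, str, int]) -> List[str]:
--     new_ad_name, new_customer, new_day = new_ad
--     new_week = get_week_number(new_day)
--     relevant_ads = []
--     for ad_name, customer, day in sent_ads:
--         if customer == new_customer and get_week_number(day) == new_week:
--             relevant_ads.append(ad_name)
--     if new_ad_name in relevant_ads or len(relevant_ads) >= 3:
--         return [new_customer]
--     return []
-- ===== Notes on version B (the rewrite author's own statement) =====
-- stated objective: simpler
-- what changed: Replaces the full {customer:{week:[ads]}} nested-dict index plus chained membership checks with one filtered pass that collects only the new customer's ads in the new ad's week into a flat list, then a single blocking test.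
import Mathlib
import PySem

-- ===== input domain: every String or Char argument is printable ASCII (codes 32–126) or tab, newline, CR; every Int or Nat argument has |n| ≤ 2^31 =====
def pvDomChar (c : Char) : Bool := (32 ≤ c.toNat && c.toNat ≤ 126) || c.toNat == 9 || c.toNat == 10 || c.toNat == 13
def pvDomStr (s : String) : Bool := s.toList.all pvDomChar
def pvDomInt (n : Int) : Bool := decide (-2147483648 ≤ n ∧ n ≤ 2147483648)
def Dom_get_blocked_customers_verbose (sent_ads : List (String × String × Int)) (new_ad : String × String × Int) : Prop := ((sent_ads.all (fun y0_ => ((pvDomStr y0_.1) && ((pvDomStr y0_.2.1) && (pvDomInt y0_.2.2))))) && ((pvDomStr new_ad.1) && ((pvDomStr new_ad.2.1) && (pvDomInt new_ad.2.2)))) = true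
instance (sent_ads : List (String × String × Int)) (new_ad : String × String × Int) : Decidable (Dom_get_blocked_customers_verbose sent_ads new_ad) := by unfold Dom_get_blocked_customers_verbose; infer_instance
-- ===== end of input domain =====

-- B replaces A's nested {customer:{week:[ads]}} dict with one filtered pass collecting a flat list (simpler, same cost).

-- ===== PORT A =====
-- helper: get_week_number(day) = (day - 1) // 7 + 1
def get_week_number (day : Int) : Int := PySem.Int.floordiv (day - 1) 7 + 1

-- A's loop body: ensure d[customer] exists, ensure d[customer][week] exists, append ad_name
def pvStepA (d : PySem.Dict String (PySem.Dict Int (List String))) (p : String × String × Int) :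
    PySem.Dict String (PySem.Dict Int (List String)) :=
  let week := get_week_number p.2.2
  let d := if d.contains p.2.1 then d else d.insert p.2.1 PySem.Dict.empty
  let inner := d.getD p.2.1 PySem.Dict.empty
  let inner := if inner.contains week then inner else inner.insert week []
  let inner := inner.insert week (inner.getD week [] ++ [p.1])
  d.insert p.2.1 inner

def get_blocked_customers_verbose (sent_ads : List (String × String × Int)) (new_ad : String × String × Int) : List String :=
  let new_week := get_week_number new_ad.2.2
  let d := sent_ads.foldl pvStepA PySem.Dict.empty
  if d.contains new_ad.2.1 then
    let inner := d.getD new_ad.2.1 PySem.Dict.empty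
    if inner.contains new_week then
      let ads_in_week := inner.getD new_week []
      if ads_in_week.contains new_ad.1 then [new_ad.2.1]
      else if 3 ≤ ads_in_week.length then [new_ad.2.1]
      else []
    else []
  else []

-- ===== PORT B =====
def get_blocked_customers_verbose_alt (sent_ads : List (String × String × Int)) (new_ad : String × String × Int) : List String :=
  let new_week := get_week_number new_ad.2.2
  let relevant_ads := sent_ads.foldl
    (fun acc p => if p.2.1 == new_ad.2.1 && get_week_number p.2.2 == new_week then acc ++ [p.1] else acc) []
  if relevant_ads.contains new_ad.1 || 3 ≤ relevant_ads.length then [new_ad.2.1] else []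

-- ===== PRECONDITION & SPEC =====
def Spec_get_blocked_customers_verbose (sent_ads : List (String × String × Int)) (new_ad : String × String × Int) (out : List String) : Prop := out = get_blocked_customers_verbose_alt sent_ads new_ad
instance (sent_ads : List (String × String × Int)) (new_ad : String × String × Int) (out : List String) : Decidable (Spec_get_blocked_customers_verbose sent_ads new_ad out) := by unfold Spec_get_blocked_customers_verbose; infer_instance

-- ===== CLAIM (what is proved, stated in full; the proofs are below) =====
def Claim_equal_get_blocked_customers_verbose : Prop := ∀ (sent_ads : List (String × String × Int)) (new_ad : String × String × Int), Dom_get_blocked_customers_verbose sent_ads new_ad → Spec_get_blocked_customers_verbose sent_ads new_ad (get_blocked_customers_verbose sent_ads new_ad)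

-- ===== LEMMAS AND PROOFS =====

-- the per-(customer, week) predicate both loops are really about
def pvRel (c : String) (w : Int) (p : String × String × Int) : Bool :=
  p.2.1 == c && get_week_number p.2.2 == w

-- B's loop is the standard filtered-append fold (foldl_append_if), phrased on pvRel
theorem pvB_fold (l : List (String × String × Int)) (c : String) (w : Int) (acc : List String) :
    l.foldl (fun acc p => if p.2.1 == c && get_week_number p.2.2 == w then acc ++ [p.1] else acc) acc
      = acc ++ (l.filter (pvRel c w)).map (·.1) :=
  PySem.List.foldl_append_if (pvRel c w) (·.1) l acc

-- one A-step: outer-key membership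
theorem pvStepA_contains (d : PySem.Dict String (PySem.Dict Int (List String))) (p : String × String × Int) (c : String) :
    (pvStepA d p).contains c = (d.contains c || p.2.1 == c) := by
  unfold pvStepA
  by_cases hc : p.2.1 = c
  · subst hc
    by_cases hd : d.contains p.2.1 = true <;>
      simp_all
  · by_cases hd : d.contains p.2.1 = true <;>
      simp_all [PySem.Dict.contains_insert, beq_false_of_ne hc,
                beq_false_of_ne (Ne.symm hc), Bool.or_comm]

-- one A-step: inner-key membership
theorem pvStepA_inner_contains (d : PySem.Dict String (PySem.Dict Int (List String))) (p : String × String × Int) (c : String) (w : Int) :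
    ((pvStepA d p).getD c PySem.Dict.empty).contains w
      = (((d.getD c PySem.Dict.empty).contains w) || pvRel c w p) := by
  unfold pvStepA pvRel
  by_cases hc : p.2.1 = c
  · subst hc
    by_cases hw : get_week_number p.2.2 = w
    · subst hw
      by_cases hi : (d.getD p.2.1 PySem.Dict.empty).contains (get_week_number p.2.2) = true <;>
        by_cases hd : d.contains p.2.1 = true <;>
          simp_all [PySem.Dict.getD_insert_self,
                    PySem.Dict.getD_of_not_contains]
    · by_cases hi : (d.getD p.2.1 PySem.Dict.empty).contains (get_week_number p.2.2) = true <;>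
        by_cases hd : d.contains p.2.1 = true <;>
          simp_all [PySem.Dict.getD_insert_self, PySem.Dict.contains_insert,
                    PySem.Dict.getD_of_not_contains, beq_false_of_ne hw,
                    beq_false_of_ne (Ne.symm hw), Bool.or_comm]
  · by_cases hd : d.contains p.2.1 = true <;>
      simp_all [PySem.Dict.getD_insert_of_ne _ _ _ (Ne.symm hc), beq_false_of_ne hc]

-- one A-step: the stored ad-name list for (c, w)
theorem pvStepA_list (d : PySem.Dict String (PySem.Dict Int (List String))) (p : String × String × Int) (c : String) (w : Int) :
    ((pvStepA d p).getD c PySem.Dict.empty).getD w []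
      = (if pvRel c w p then (d.getD c PySem.Dict.empty).getD w [] ++ [p.1]
         else (d.getD c PySem.Dict.empty).getD w []) := by
  unfold pvStepA pvRel
  by_cases hc : p.2.1 = c
  · subst hc
    by_cases hw : get_week_number p.2.2 = w
    · subst hw
      by_cases hi : (d.getD p.2.1 PySem.Dict.empty).contains (get_week_number p.2.2) = true <;>
        by_cases hd : d.contains p.2.1 = true <;>
          simp_all [PySem.Dict.getD_insert_self,
                    PySem.Dict.getD_of_not_contains]
    · by_cases hi : (d.getD p.2.1 PySem.Dict.empty).contains (get_week_number p.2.2) = true <;>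
        by_cases hd : d.contains p.2.1 = true <;>
          simp_all [PySem.Dict.getD_insert_self,
                    PySem.Dict.getD_insert_of_ne _ _ _ (Ne.symm hw),
                    PySem.Dict.getD_of_not_contains, beq_false_of_ne hw]
  · by_cases hd : d.contains p.2.1 = true <;>
      simp_all [PySem.Dict.getD_insert_of_ne _ _ _ (Ne.symm hc), beq_false_of_ne hc]

-- A's whole fold: outer-key membership
theorem pvA_contains (l : List (String × String × Int)) (d : PySem.Dict String (PySem.Dict Int (List String))) (c : String) :
    (l.foldl pvStepA d).contains c = (d.contains c || l.any (fun p => p.2.1 == c)) := by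
  induction l generalizing d with
  | nil => simp
  | cons p l ih => simp [ih, pvStepA_contains, Bool.or_assoc]

-- A's whole fold: inner-key membership
theorem pvA_inner_contains (l : List (String × String × Int)) (d : PySem.Dict String (PySem.Dict Int (List String))) (c : String) (w : Int) :
    ((l.foldl pvStepA d).getD c PySem.Dict.empty).contains w
      = ((d.getD c PySem.Dict.empty).contains w || l.any (pvRel c w)) := by
  induction l generalizing d with
  | nil => simp
  | cons p l ih => simp [ih, pvStepA_inner_contains, Bool.or_assoc]

-- A's whole fold: the stored ad-name list for (c, w)
theorem pvA_list (l : List (String × String × Int)) (d : PySem.Dict String (PySem.Dict Int (List String))) (c : String) (w : Int) :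
    ((l.foldl pvStepA d).getD c PySem.Dict.empty).getD w []
      = (d.getD c PySem.Dict.empty).getD w [] ++ (l.filter (pvRel c w)).map (·.1) := by
  induction l generalizing d with
  | nil => simp
  | cons p l ih =>
    simp only [List.foldl_cons, List.filter_cons, ih, pvStepA_list]
    by_cases h : pvRel c w p = true <;> simp [h]

-- ===== VERDICT (by name: the statement is the Claim_ definition above) =====
theorem get_blocked_customers_verbose_spec : Claim_equal_get_blocked_customers_verbose := by
  intro sent_ads new_ad _
  unfold Spec_get_blocked_customers_verbose
  simp only [get_blocked_customers_verbose, get_blocked_customers_verbose_alt,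
             pvB_fold, pvA_contains, pvA_inner_contains, pvA_list,
             PySem.Dict.contains_empty, PySem.Dict.getD_empty, Bool.false_or,
             List.nil_append]
  set w := get_week_number new_ad.2.2 with hw
  set rel := (sent_ads.filter (pvRel new_ad.2.1 w)).map (·.1) with hrel
  by_cases hiw : sent_ads.any (pvRel new_ad.2.1 w) = true
  · have hc : sent_ads.any (fun p => p.2.1 == new_ad.2.1) = true := by
      rw [List.any_eq_true] at hiw ⊢
      obtain ⟨p, hp, hrelp⟩ := hiw
      rw [pvRel, Bool.and_eq_true] at hrelp
      exact ⟨p, hp, hrelp.1⟩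
    rw [hc, hiw]
    simp only [if_true]
    by_cases hmem : new_ad.1 ∈ rel
    · simp [hmem]
    · by_cases hlen : 3 ≤ rel.length <;> simp [hmem, hlen]
  · have hrel0 : rel = [] := by
      rw [hrel, List.map_eq_nil_iff, List.filter_eq_nil_iff]
      intro p hp
      simp only [List.any_eq_true, not_exists, not_and] at hiw
      simpa using hiw p hp
    simp only [Bool.not_eq_true] at hiw
    rw [hiw, hrel0]
    simp
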